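-- pv_equiv track=rewrite | github.com/McGovMan/College | 4th Year/CT437/assignment_2/problem_1/problem1.py | handleLFSR
-- ===== SOURCE A (Python) =====
-- def getClockingBit(r):
--     return (r ^ (r >> 14) ^ (r >> 17) ^ (r >> 18) ^ (r >> 19)) & 1
--
-- def getMajorityBit(r1, r2):
--     return r1 & 1 ^ r2 & 1
--
-- def handleLFSR(r1, r2, i):
--     out = ""
--     for x in range(0, i):
--         m_bit = getMajorityBit(r1, r2)
--         r1_c_bit = getClockingBit(r1)
--         r2_c_bit = getClockingBit(r2)
--
--         out += str(m_bit)
--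
--         r1 = (r1 >> 1) | (r1_c_bit << 31)
--         r2 = (r2 >> 1) | (r2_c_bit << 31)
--     return out
-- ===== SOURCE B (Python) =====
-- def getClockingBit(r):
--     return (r ^ (r >> 14) ^ (r >> 17) ^ (r >> 18) ^ (r >> 19)) & 1
--
-- def _bitStream(r, n):
--     """Step register r n times; return list of its low bits."""
--     bits = []
--     for _ in range(n):
--         bits.append(r & 1)
--         r = (r >> 1) | (getClockingBit(r) << 31)
--     return bits
--
-- def handleLFSR(r1, r2, i):
--     n = max(i, 0)
--     s1 = _bitStream(r1, n)
--     s2 = _bitStream(r2, n)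
--     return "".join(str(b1 ^ b2) for b1, b2 in zip(s1, s2))
-- ===== Notes on version B (the rewrite author's own statement) =====
-- stated objective: alternative
-- what changed: Replaces A's single interleaved loop (threading the output string and both registers together) by two independent per-register bit-stream generation passes whose sequences are then XORed pairwise and joined into the output.
import Mathlib
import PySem

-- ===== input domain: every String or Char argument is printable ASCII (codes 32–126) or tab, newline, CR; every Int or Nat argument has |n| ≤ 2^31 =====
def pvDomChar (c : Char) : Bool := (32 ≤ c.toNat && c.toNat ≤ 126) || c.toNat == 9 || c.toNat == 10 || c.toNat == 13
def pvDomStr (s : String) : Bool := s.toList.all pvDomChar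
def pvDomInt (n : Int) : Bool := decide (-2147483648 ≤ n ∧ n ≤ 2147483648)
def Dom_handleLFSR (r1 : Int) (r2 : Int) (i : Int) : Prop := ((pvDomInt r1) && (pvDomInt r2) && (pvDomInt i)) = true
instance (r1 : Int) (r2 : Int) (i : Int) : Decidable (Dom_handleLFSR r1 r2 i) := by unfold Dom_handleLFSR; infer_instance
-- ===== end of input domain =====

-- B replaces A's single interleaved loop by two independent per-register bit-stream
-- passes combined by a pairwise XOR join (objective: alternative decomposition, same cost).

-- ===== PORT A =====
def getClockingBit (r : Int) : Int :=
  PySem.Int.band (PySem.Int.bxor (PySem.Int.bxor (PySem.Int.bxor (PySem.Int.bxor r (r >>> 14)) (r >>> 17)) (r >>> 18)) (r >>> 19)) 1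

def getMajorityBit (r1 : Int) (r2 : Int) : Int :=
  PySem.Int.bxor (PySem.Int.band r1 1) (PySem.Int.band r2 1)

def handleLFSR (r1 : Int) (r2 : Int) (i : Int) : String :=
  let st := (PySem.List.pyRange 0 i 1).foldl
    (fun (st : String × Int × Int) _ =>
      let m_bit := getMajorityBit st.2.1 st.2.2
      let r1_c_bit := getClockingBit st.2.1
      let r2_c_bit := getClockingBit st.2.2
      (st.1 ++ PySem.Int.toStr m_bit,
       PySem.Int.bor (st.2.1 >>> 1) (r1_c_bit <<< 31),
       PySem.Int.bor (st.2.2 >>> 1) (r2_c_bit <<< 31)))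
    ("", r1, r2)
  st.1

-- ===== PORT B =====
def getClockingBitB (r : Int) : Int :=
  PySem.Int.band (PySem.Int.bxor (PySem.Int.bxor (PySem.Int.bxor (PySem.Int.bxor r (r >>> 14)) (r >>> 17)) (r >>> 18)) (r >>> 19)) 1

-- step r n times, recording the low bit at each step
def bitStream (r : Int) : Nat → List Int
  | 0 => []
  | n + 1 => PySem.Int.band r 1 :: bitStream (PySem.Int.bor (r >>> 1) (getClockingBitB r <<< 31)) n

def handleLFSR_alt (r1 : Int) (r2 : Int) (i : Int) : String :=
  let n := (max i 0).toNat
  let s1 := bitStream r1 n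
  let s2 := bitStream r2 n
  String.join ((s1.zip s2).map (fun p => PySem.Int.toStr (PySem.Int.bxor p.1 p.2)))

-- ===== PRECONDITION & SPEC =====
def Spec_handleLFSR (r1 : Int) (r2 : Int) (i : Int) (out : String) : Prop := out = handleLFSR_alt r1 r2 i
instance (r1 : Int) (r2 : Int) (i : Int) (out : String) : Decidable (Spec_handleLFSR r1 r2 i out) := by unfold Spec_handleLFSR; infer_instance

-- ===== CLAIM (what is proved, stated in full; the proofs are below) =====
def Claim_equal_handleLFSR : Prop := ∀ (r1 : Int) (r2 : Int) (i : Int), Dom_handleLFSR r1 r2 i → Spec_handleLFSR r1 r2 i (handleLFSR r1 r2 i)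

-- ===== LEMMAS AND PROOFS =====

theorem foldl_append_str (l : List String) : ∀ x : String,
    List.foldl (fun r s => r ++ s) x l = x ++ List.foldl (fun r s => r ++ s) "" l := by
  induction l with
  | nil => simp
  | cons hd tl ih =>
      intro x
      simp only [List.foldl_cons]
      rw [ih (x ++ hd), ih ("" ++ hd)]
      simp [String.append_assoc]

-- A's loop body ignores the loop index, so the fold only depends on the list's length;
-- its string component equals B's joined XOR stream.
theorem handleLFSR_loop_eq (l : List Int) : ∀ (out : String) (r1 r2 : Int),
    (l.foldl
      (fun (st : String × Int × Int) _ =>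
        let m_bit := getMajorityBit st.2.1 st.2.2
        let r1_c_bit := getClockingBit st.2.1
        let r2_c_bit := getClockingBit st.2.2
        (st.1 ++ PySem.Int.toStr m_bit,
         PySem.Int.bor (st.2.1 >>> 1) (r1_c_bit <<< 31),
         PySem.Int.bor (st.2.2 >>> 1) (r2_c_bit <<< 31)))
      (out, r1, r2)).1
      = out ++ String.join (((bitStream r1 l.length).zip (bitStream r2 l.length)).map
          (fun p => PySem.Int.toStr (PySem.Int.bxor p.1 p.2))) := by
  induction l with
  | nil =>
      intro out r1 r2
      simp [bitStream, String.join]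
  | cons hd tl ih =>
      intro out r1 r2
      simp only [List.foldl_cons, List.length_cons, bitStream, List.zip_cons_cons,
        List.map_cons, String.join]
      rw [ih]
      simp only [getMajorityBit, getClockingBit, getClockingBitB, String.join]
      rw [foldl_append_str _ ("" ++ PySem.Int.toStr (PySem.Int.bxor (PySem.Int.band r1 1) (PySem.Int.band r2 1)))]
      simp [String.append_assoc]

theorem handleLFSR_spec' : ∀ (r1 r2 i : Int), handleLFSR r1 r2 i = handleLFSR_alt r1 r2 i := by
  intro r1 r2 i
  unfold handleLFSR handleLFSR_alt
  rw [handleLFSR_loop_eq]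
  have hlen : (PySem.List.pyRange 0 i 1).length = (max i 0).toNat := by
    rw [PySem.List.length_pyRange_one]; omega
  simp [hlen]

-- ===== VERDICT (by name: the statement is the Claim_ definition above) =====
theorem handleLFSR_spec : Claim_equal_handleLFSR := by
  intro r1 r2 i _
  unfold Spec_handleLFSR
  exact handleLFSR_spec' r1 r2 i
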